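-- pv_equiv track=rewrite | github.com/Marques-079/Advent-of-Code-2024---No-imports | day-21/q-21b.py | dir_len
-- ===== SOURCE A (Python) =====
-- def pairwise(iterable):
--     it = iter(iterable)
--     try:
--         prev = next(it)
--     except StopIteration:
--         return
--     for item in it:
--         yield prev, item
--         prev = item
--
-- dir_lookup = {
--     ('A', 'A'): 'A',  ('^', '^'): 'A', ('>', '>'): 'A', ('v', 'v'): 'A',
--     ('<', '<'): 'A',  ('A', '^'): '<A', ('^', 'A'): '>A', ('A', '>'): 'vA',
--     ('>', 'A'): '^A', ('v', '^'): '^A', ('^', 'v'): 'vA', ('v', '<'): '<A',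
--     ('<', 'v'): '>A', ('v', '>'): '>A', ('>', 'v'): '<A',
--
--     ('A', 'v'): '<vA', ('v', 'A'): '^>A', ('A', '<'): 'v<<A', ('<', 'A'): '>>^A',
--     ('>', '<'): '<<A', ('<', '>'): '>>A', ('<', '^'): '>^A', ('^', '<'): 'v<A',
--     ('>', '^'): '<^A', ('^', '>'): 'v>A',
-- }
--
-- memo_dir = {}
--
-- def dir_len(s, depth= 25):
--     """
--     Main difference here is in the dir function here.
--     Instead of passing around the actuals strings it passes around integer values.
--     Because we know the best methods to naviagate the directional keypad its very fast 0(1) lookup.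
--     After receving a string of dirs and then splitting it pairwise we apply the pass down expansions
--     """
--     if depth == 0:
--         return len(s) #KEYSTEP WE PASS UP INTEGERS INSTEAD OF STRINGS
--     cached = memo_dir.get((s, depth)) #memory here
--     if cached is not None:
--         return cached
--
--     total = 0
--     for a, b in pairwise("A" + s):      # every hop starts at 'A' ->>> For loop is crucial for memorisation as we move down branch we remeber all calcs
--         ''' <- Applying expansions here '''
--         total += dir_len(dir_lookup[a, b], depth - 1)
--         '''
--         Expands the pairwise into the standard AxxxA format which doesnt explode string. Calls recursively on this and splits again.
--         Difference between A and B code is building these strings be realtively small.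
--         Its the concatenation which takes the most time?
--         '''
--     memo_dir[s, depth] = total #S = string and depth = depth
--     return total
-- ===== SOURCE B (Python) =====
-- dir_lookup = {
--     ('A', 'A'): 'A',  ('^', '^'): 'A', ('>', '>'): 'A', ('v', 'v'): 'A',
--     ('<', '<'): 'A',  ('A', '^'): '<A', ('^', 'A'): '>A', ('A', '>'): 'vA',
--     ('>', 'A'): '^A', ('v', '^'): '^A', ('^', 'v'): 'vA', ('v', '<'): '<A',
--     ('<', 'v'): '>A', ('v', '>'): '>A', ('>', 'v'): '<A',
--
--     ('A', 'v'): '<vA', ('v', 'A'): '^>A', ('A', '<'): 'v<<A', ('<', 'A'): '>>^A',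
--     ('>', '<'): '<<A', ('<', '>'): '>>A', ('<', '^'): '>^A', ('^', '<'): 'v<A',
--     ('>', '^'): '<^A', ('^', '>'): 'v>A',
-- }
--
--
-- def dir_len(s, depth=25):
--     # Bottom-up: keep a counter of adjacent hops (every hop starts implicitly
--     # from 'A'), expand the whole counter one level at a time, and return the
--     # total count, which is the fully expanded length.
--     pairs = {}
--     prev = 'A'
--     for ch in s:
--         pairs[(prev, ch)] = pairs.get((prev, ch), 0) + 1
--         prev = ch
--     for _ in range(depth):
--         nxt = {}
--         for (a, b), c in pairs.items():
--             p = 'A'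
--             for ch in dir_lookup[(a, b)]:
--                 nxt[(p, ch)] = nxt.get((p, ch), 0) + c
--                 p = ch
--         pairs = nxt
--     return sum(pairs.values())
-- ===== Notes on version B (the rewrite author's own statement) =====
-- stated objective: alternative
-- what changed: Replaces A's top-down memoized recursion over expansion strings by a bottom-up counter of adjacent hop pairs that is expanded once per depth level and finally summed (sum of pair counts = expanded length).
-- outside the precondition, e.g. on dir_len('A', 996): A returns 1, B returns 1; on dir_len('A', -1): A raises RecursionError, B returns 1
import Mathlib
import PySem

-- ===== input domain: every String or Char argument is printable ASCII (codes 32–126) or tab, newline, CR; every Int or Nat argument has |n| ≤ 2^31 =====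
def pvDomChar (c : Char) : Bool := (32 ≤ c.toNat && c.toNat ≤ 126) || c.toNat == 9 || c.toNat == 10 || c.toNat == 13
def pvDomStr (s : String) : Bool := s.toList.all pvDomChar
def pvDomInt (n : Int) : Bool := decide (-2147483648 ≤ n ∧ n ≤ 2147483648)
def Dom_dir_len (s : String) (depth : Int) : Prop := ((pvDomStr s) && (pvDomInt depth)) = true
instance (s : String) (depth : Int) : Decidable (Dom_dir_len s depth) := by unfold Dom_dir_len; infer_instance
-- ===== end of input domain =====

-- B replaces A's top-down memoized recursion over expansion strings by a bottom-up
-- counter of adjacent hop pairs, expanded once per depth level and finally summed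
-- (alternative decomposition; return value only — A also fills a module-level memo cache).


-- ===== PORT A =====

-- the module constant dir_lookup (shared context of both programs)
def dirLookup : PySem.Dict (Char × Char) String := PySem.Dict.ofList [
  (('A', 'A'), "A"),  (('^', '^'), "A"), (('>', '>'), "A"), (('v', 'v'), "A"),
  (('<', '<'), "A"),  (('A', '^'), "<A"), (('^', 'A'), ">A"), (('A', '>'), "vA"),
  (('>', 'A'), "^A"), (('v', '^'), "^A"), (('^', 'v'), "vA"), (('v', '<'), "<A"),
  (('<', 'v'), ">A"), (('v', '>'), ">A"), (('>', 'v'), "<A"),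
  (('A', 'v'), "<vA"), (('v', 'A'), "^>A"), (('A', '<'), "v<<A"), (('<', 'A'), ">>^A"),
  (('>', '<'), "<<A"), (('<', '>'), ">>A"), (('<', '^'), ">^A"), (('^', '<'), "v<A"),
  (('>', '^'), "<^A"), (('^', '>'), "v>A")]

-- Python's dir_lookup[a, b] raises KeyError for a missing key; Pre_ excludes those
-- inputs, so the port uses getD with a dummy default "".

-- port of the helper generator 'pairwise' (exact: the yielded (prev, item) pairs, in order)
def pairwisePyGo (prev : α) : List α → List (α × α)
  | [] => []
  | y :: ys => (prev, y) :: pairwisePyGo y ys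

def pairwisePy : List α → List (α × α)
  | [] => []
  | x :: xs => pairwisePyGo x xs

-- A's recursion, with the memo dict threaded through explicitly (Python keeps it in the
-- module-level global memo_dir; the cache never changes the returned value).  The fuel
-- argument mirrors the depth countdown: dir_len calls it with fuel = depth.toNat, and on
-- every admitted input (0 ≤ depth) fuel reaches 0 exactly when depth == 0.
def dirLenGo : Nat → PySem.Dict (String × Int) Int → String → Int →
    Int × PySem.Dict (String × Int) Int
  | 0, memo, s, _ => (PySem.Str.len s, memo)
  | fuel + 1, memo, s, depth =>
    if depth == 0 then (PySem.Str.len s, memo)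
    else
      match memo.get? (s, depth) with
      | some cached => (cached, memo)
      | none =>
        let r := (pairwisePy ('A' :: s.toList)).foldl
          (fun (acc : Int × PySem.Dict (String × Int) Int) p =>
            let t := dirLenGo fuel acc.2 (dirLookup.getD p "") (depth - 1)
            (acc.1 + t.1, t.2)) (0, memo)
        (r.1, r.2.insert (s, depth) r.1)

def dir_len (s : String) (depth : Int) : Int :=
  (dirLenGo depth.toNat PySem.Dict.empty s depth).1

-- ===== PORT B =====

-- pairs[(prev, ch)] = pairs.get((prev, ch), 0) + c
def addCount (d : PySem.Dict (Char × Char) Int) (p : Char × Char) (c : Int) :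
    PySem.Dict (Char × Char) Int :=
  d.insert p (d.getD p 0 + c)

-- the first loop of B: build the counter of adjacent pairs of "A"+s (state = (pairs, prev))
def countPairs (l : List Char) : PySem.Dict (Char × Char) Int × Char :=
  l.foldl (fun st ch => (addCount st.1 (st.2, ch) 1, ch)) (PySem.Dict.empty, 'A')

-- the inner loop of B: add c at every adjacent pair of "A"+dir_lookup[a,b]
def expandPair (nxt : PySem.Dict (Char × Char) Int) (p : Char × Char) (c : Int) :
    PySem.Dict (Char × Char) Int :=
  ((dirLookup.getD p "").toList.foldl
    (fun st ch => (addCount st.1 (st.2, ch) c, ch)) (nxt, 'A')).1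

-- one depth level: expand every counted pair into a fresh counter
def stepCounter (pairs : PySem.Dict (Char × Char) Int) : PySem.Dict (Char × Char) Int :=
  pairs.items.foldl (fun nxt pc => expandPair nxt pc.1 pc.2) PySem.Dict.empty

def dir_len_alt (s : String) (depth : Int) : Int :=
  ((PySem.List.pyRange 0 depth 1).foldl (fun pairs _ => stepCounter pairs)
    (countPairs s.toList).1).values.sum

-- ===== PRECONDITION & SPEC =====

-- Pre_ excludes exactly the inputs on which the Python A does not reliably return a value:
-- strings containing a character outside "A^>v<" at nonzero depth (KeyError in dir_lookup),
-- negative depths (unbounded recursion, RecursionError), and depths above 995, where A's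
-- recursion chain of depth frames meets CPython's default recursion limit of 1000 and
-- whether A returns or raises RecursionError depends on the caller's existing stack depth
-- (and on leftovers in the module-level memo cache), not on the input alone.
def Pre_dir_len (s : String) (depth : Int) : Prop :=
  0 ≤ depth ∧ depth ≤ 995 ∧
    (depth = 0 ∨
      (s.toList.all (fun c => c == 'A' || c == '^' || c == '>' || c == 'v' || c == '<')) = true)

instance (s : String) (depth : Int) : Decidable (Pre_dir_len s depth) := by
  unfold Pre_dir_len; infer_instance

def pvWitness_dir_len : String × Int := ("<A", 2)

def Spec_dir_len (s : String) (depth : Int) (out : Int) : Prop := out = dir_len_alt s depth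
instance (s : String) (depth : Int) (out : Int) : Decidable (Spec_dir_len s depth out) := by
  unfold Spec_dir_len; infer_instance

-- ===== CLAIM (what is proved, stated in full; the proofs are below) =====
def Claim_equal_dir_len : Prop := ∀ (s : String) (depth : Int),
  Dom_dir_len s depth → Pre_dir_len s depth → Spec_dir_len s depth (dir_len s depth)

-- ===== LEMMAS AND PROOFS =====

-- the adjacent pairs of "A"+l, the common currency of both proofs
def pairsOf (l : List Char) : List (Char × Char) := List.zip ('A' :: l) l

-- the mathematical function both ports compute: length of the d-fold expansion of s
def F : Nat → List Char → Int
  | 0, l => l.length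
  | d + 1, l => ((pairsOf l).map (fun p => F d (dirLookup.getD p "").toList)).sum

-- per-pair expansion length
def g : Nat → Char × Char → Int
  | 0, _ => 1
  | d + 1, p => ((pairsOf (dirLookup.getD p "").toList).map (g d)).sum

theorem pairwisePyGo_eq_zip (prev : α) (l : List α) :
    pairwisePyGo prev l = List.zip (prev :: l) l := by
  induction l generalizing prev with
  | nil => rfl
  | cons y ys ih => simp [pairwisePyGo, List.zip, ih y]

theorem pairwisePy_eq_pairsOf (l : List Char) :
    pairwisePy ('A' :: l) = pairsOf l := by
  simp [pairwisePy, pairsOf, pairwisePyGo_eq_zip]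

theorem length_pairsOf (l : List Char) : (pairsOf l).length = l.length := by
  simp [pairsOf]

theorem F_eq_sum_g (d : Nat) (l : List Char) :
    F d l = ((pairsOf l).map (g d)).sum := by
  induction d generalizing l with
  | zero =>
    simp only [F, g, List.map_const']
    rw [List.sum_replicate, length_pairsOf]
    simp
  | succ d ih =>
    simp only [F, g]
    exact congrArg List.sum (List.map_congr_left fun p _ => ih _)

-- ---------- A side: the memoized recursion computes F ----------

def MemoInv (memo : PySem.Dict (String × Int) Int) : Prop :=
  ∀ s d v, memo.get? (s, d) = some v → ∃ n : Nat, d = (n : Int) ∧ v = F n s.toList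

theorem dirLenGo_correct (n : Nat) :
    ∀ memo s, MemoInv memo →
      (dirLenGo n memo s (n : Int)).1 = F n s.toList ∧
        MemoInv (dirLenGo n memo s (n : Int)).2 := by
  induction n with
  | zero =>
    intro memo s hinv
    constructor
    · simp [dirLenGo, F, PySem.Str.len]
    · exact hinv
  | succ n ih =>
    intro memo s hinv
    have hne : (((n + 1 : Nat) : Int) == 0) = false := by simp; omega
    have hsub : ((n + 1 : Nat) : Int) - 1 = (n : Int) := by push_cast; ring
    -- the inner fold over the pairwise list
    have inner : ∀ (ps : List (Char × Char)) (acc : Int)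
        (m : PySem.Dict (String × Int) Int), MemoInv m →
        (ps.foldl
            (fun (a : Int × PySem.Dict (String × Int) Int) p =>
              (a.1 + (dirLenGo n a.2 (dirLookup.getD p "") (n : Int)).1,
               (dirLenGo n a.2 (dirLookup.getD p "") (n : Int)).2)) (acc, m)).1
          = acc + (ps.map (fun p => F n (dirLookup.getD p "").toList)).sum ∧
        MemoInv (ps.foldl
            (fun (a : Int × PySem.Dict (String × Int) Int) p =>
              (a.1 + (dirLenGo n a.2 (dirLookup.getD p "") (n : Int)).1,
               (dirLenGo n a.2 (dirLookup.getD p "") (n : Int)).2)) (acc, m)).2 := by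
      intro ps
      induction ps with
      | nil => intro acc m hm; exact ⟨by simp, hm⟩
      | cons p ps ihp =>
        intro acc m hm
        simp only [List.foldl_cons, List.map_cons, List.sum_cons]
        have ht := ih m (dirLookup.getD p "") hm
        have hstep := ihp (acc + (dirLenGo n m (dirLookup.getD p "") (n : Int)).1)
          (dirLenGo n m (dirLookup.getD p "") (n : Int)).2 ht.2
        refine ⟨?_, hstep.2⟩
        rw [hstep.1, ht.1]
        ring
    rcases hget : memo.get? (s, ((n + 1 : Nat) : Int)) with _ | v
    · -- cache miss: compute the fold and memoize
      have hin := inner (pairwisePy ('A' :: s.toList)) 0 memo hinv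
      have hF : ((pairwisePy ('A' :: s.toList)).foldl
            (fun (a : Int × PySem.Dict (String × Int) Int) p =>
              (a.1 + (dirLenGo n a.2 (dirLookup.getD p "") (n : Int)).1,
               (dirLenGo n a.2 (dirLookup.getD p "") (n : Int)).2)) (0, memo)).1
            = F (n + 1) s.toList := by
        rw [hin.1, pairwisePy_eq_pairsOf]
        simp [F]
      constructor
      · simp only [dirLenGo, hne, Bool.false_eq_true, if_false, hget, hsub]
        exact hF
      · simp only [dirLenGo, hne, Bool.false_eq_true, if_false, hget, hsub]
        intro s' d' v' hv'
        rw [PySem.Dict.get?_insert] at hv'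
        by_cases he : (s', d') = (s, ((n + 1 : Nat) : Int))
        · rw [if_pos he] at hv'
          have hs' : s' = s := congrArg Prod.fst he
          have hd' : d' = ((n + 1 : Nat) : Int) := congrArg Prod.snd he
          refine ⟨n + 1, hd', ?_⟩
          rw [← Option.some_inj.mp hv', hs', hF]
        · rw [if_neg he] at hv'
          exact hin.2 s' d' v' hv'
    · -- cache hit
      obtain ⟨m, hm1, hm2⟩ := hinv s _ v hget
      have hmn : m = n + 1 := by exact_mod_cast hm1.symm
      subst hmn
      constructor
      · simp only [dirLenGo, hne, Bool.false_eq_true, if_false, hget]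
        exact hm2
      · simp only [dirLenGo, hne, Bool.false_eq_true, if_false, hget]
        exact hinv

theorem dir_len_eq_F (s : String) (depth : Int) (h : 0 ≤ depth) :
    dir_len s depth = F depth.toNat s.toList := by
  have hd : depth = (depth.toNat : Int) := (Int.toNat_of_nonneg h).symm
  have hinv : MemoInv PySem.Dict.empty := by
    intro s d v hv; simp [PySem.Dict.get?_empty] at hv
  have := dirLenGo_correct depth.toNat PySem.Dict.empty s hinv
  unfold dir_len
  rw [hd] at this ⊢
  exact this.1

-- ---------- B side: counter expansion computes F ----------

-- weighted total of a counter
def W (h : Char × Char → Int) (d : PySem.Dict (Char × Char) Int) : Int :=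
  (d.items.map (fun kv => kv.2 * h kv.1)).sum

theorem W_empty (h : Char × Char → Int) : W h PySem.Dict.empty = 0 := rfl

theorem sum_replace (h : Char × Char → Int) (p : Char × Char) (v c : Int) :
    ∀ (l : List ((Char × Char) × Int)), (l.map (·.1)).Nodup → (p, v) ∈ l →
    ((l.map (fun q => if q.1 == p then (p, v + c) else q)).map (fun kv => kv.2 * h kv.1)).sum
      = (l.map (fun kv => kv.2 * h kv.1)).sum + c * h p := by
  intro l
  induction l with
  | nil => intro _ hm; cases hm
  | cons q t ih =>
    intro hnd hm
    simp only [List.map_cons, List.nodup_cons] at hnd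
    by_cases hq : q.1 = p
    · have hv : q = (p, v) := by
        rcases List.mem_cons.mp hm with hm | hm
        · exact hm.symm
        · exact absurd (hq ▸ List.mem_map.mpr ⟨(p, v), hm, rfl⟩ : q.1 ∈ t.map (·.1)) hnd.1
      have hrest : ∀ r ∈ t, r.1 ≠ p := by
        intro r hr he
        exact hnd.1 (hq ▸ he ▸ List.mem_map.mpr ⟨r, hr, rfl⟩)
      have ht : t.map (fun q => if q.1 == p then (p, v + c) else q) = t := by
        apply List.map_congr_left ?_ |>.trans (List.map_id t)
        intro r hr; simp [hrest r hr]
      simp only [List.map_cons, ht, List.sum_cons, hq, beq_self_eq_true, if_pos]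
      rw [hv]
      ring
    · have hm' : (p, v) ∈ t := by
        rcases List.mem_cons.mp hm with hm | hm
        · exact absurd (congrArg Prod.fst hm.symm) hq
        · exact hm
      have hne : (q.1 == p) = false := by simp [hq]
      simp only [List.map_cons, hne, Bool.false_eq_true, if_false, List.sum_cons]
      rw [ih hnd.2 hm']
      ring

theorem W_addCount (h : Char × Char → Int) (d : PySem.Dict (Char × Char) Int)
    (p : Char × Char) (c : Int) (hnd : d.keys.Nodup) :
    W h (addCount d p c) = W h d + c * h p := by
  unfold addCount W
  by_cases hc : d.contains p = true
  · obtain ⟨v, hv⟩ : ∃ v, d.get? p = some v := by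
      rw [PySem.Dict.contains_eq_isSome_get?] at hc
      exact Option.isSome_iff_exists.mp hc
    have hg : d.getD p 0 = v := PySem.Dict.getD_of_get?_eq_some d 0 hv
    rw [PySem.Dict.items_insert_of_contains d _ hc, hg]
    exact sum_replace h p v c d.items hnd (PySem.Dict.mem_items_of_get?_eq_some d hv)
  · rw [PySem.Dict.items_insert_of_not_contains d _ (by simpa using hc),
      PySem.Dict.getD_of_not_contains d _ (by simpa using hc)]
    simp

theorem nodup_keys_addCount (d : PySem.Dict (Char × Char) Int) (p : Char × Char) (c : Int)
    (hnd : d.keys.Nodup) : (addCount d p c).keys.Nodup :=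
  PySem.Dict.nodup_keys_insert d p _ hnd

-- the chain loop 'p = a0; for ch in l: addCount (p, ch) c; p = ch' adds c at every zip pair
theorem W_chain (h : Char × Char → Int) (l : List Char) (a0 : Char)
    (d : PySem.Dict (Char × Char) Int) (c : Int) (hnd : d.keys.Nodup) :
    W h (l.foldl (fun st ch => (addCount st.1 (st.2, ch) c, ch)) (d, a0)).1
        = W h d + c * ((List.zip (a0 :: l) l).map h).sum ∧
      (l.foldl (fun st ch => (addCount st.1 (st.2, ch) c, ch)) (d, a0)).1.keys.Nodup := by
  induction l generalizing a0 d with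
  | nil => simp [hnd]
  | cons ch l ih =>
    have h1 := W_addCount h d (a0, ch) c hnd
    have h2 := nodup_keys_addCount d (a0, ch) c hnd
    have := ih ch (addCount d (a0, ch) c) h2
    refine ⟨?_, this.2⟩
    simp only [List.foldl_cons]
    rw [this.1, h1]
    simp [List.zip]
    ring

theorem sum_values_eq_W (d : PySem.Dict (Char × Char) Int) :
    d.values.sum = W (fun _ => 1) d := by
  simp [W, PySem.Dict.values]

-- folding expandPair over an items list accumulates the per-pair expansions
theorem W_expand_fold (h : Char × Char → Int) (l : List ((Char × Char) × Int)) :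
    ∀ (d0 : PySem.Dict (Char × Char) Int), d0.keys.Nodup →
    W h (l.foldl (fun nxt pc => expandPair nxt pc.1 pc.2) d0)
        = W h d0 + (l.map (fun pc =>
            pc.2 * ((pairsOf (dirLookup.getD pc.1 "").toList).map h).sum)).sum ∧
      (l.foldl (fun nxt pc => expandPair nxt pc.1 pc.2) d0).keys.Nodup := by
  induction l with
  | nil => intro d0 hnd; exact ⟨by simp, hnd⟩
  | cons pc l ih =>
    intro d0 hnd
    have hch := W_chain h (dirLookup.getD pc.1 "").toList 'A' d0 pc.2 hnd
    have := ih (expandPair d0 pc.1 pc.2) (by unfold expandPair; exact hch.2)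
    refine ⟨?_, this.2⟩
    simp only [List.foldl_cons, List.map_cons, List.sum_cons]
    rw [this.1]
    unfold expandPair
    rw [hch.1]
    unfold pairsOf
    ring

theorem W_stepCounter (h : Char × Char → Int) (pairs : PySem.Dict (Char × Char) Int) :
    W h (stepCounter pairs)
        = W (fun p => ((pairsOf (dirLookup.getD p "").toList).map h).sum) pairs ∧
      (stepCounter pairs).keys.Nodup := by
  have := W_expand_fold h pairs.items PySem.Dict.empty (PySem.Dict.nodup_keys_empty)
  unfold stepCounter
  refine ⟨?_, this.2⟩
  rw [this.1, W_empty, zero_add]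
  rfl

-- iteration of stepCounter (the 'for _ in range(depth)' loop, element-blind)
def iterStep : Nat → PySem.Dict (Char × Char) Int → PySem.Dict (Char × Char) Int
  | 0, d => d
  | n + 1, d => iterStep n (stepCounter d)

theorem foldl_const_step (L : List Int) :
    ∀ d, L.foldl (fun p _ => stepCounter p) d = iterStep L.length d := by
  induction L with
  | nil => intro d; rfl
  | cons x L ih => intro d; simp only [List.foldl_cons, List.length_cons, iterStep, ih]

theorem iter_W (n : Nat) :
    ∀ pairs : PySem.Dict (Char × Char) Int, pairs.keys.Nodup →
      (iterStep n pairs).values.sum = W (g n) pairs := by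
  induction n with
  | zero =>
    intro pairs _
    rw [iterStep, sum_values_eq_W]
    simp [W, g]
  | succ n ih =>
    intro pairs hnd
    have hs := W_stepCounter (g n) pairs
    rw [iterStep, ih (stepCounter pairs) hs.2, hs.1]
    simp only [W, g]

theorem dir_len_alt_eq_F (s : String) (depth : Int) (h : 0 ≤ depth) :
    dir_len_alt s depth = F depth.toNat s.toList := by
  unfold dir_len_alt
  have hcp := W_chain (g depth.toNat) s.toList 'A' PySem.Dict.empty 1
    PySem.Dict.nodup_keys_empty
  have hlen : (PySem.List.pyRange 0 depth 1).length = depth.toNat := by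
    rw [PySem.List.length_pyRange_one]; omega
  rw [foldl_const_step, hlen, iter_W depth.toNat (countPairs s.toList).1 ?nodup]
  case nodup => unfold countPairs; exact hcp.2
  have : W (g depth.toNat) (countPairs s.toList).1
      = ((pairsOf s.toList).map (g depth.toNat)).sum := by
    unfold countPairs
    rw [hcp.1, W_empty, zero_add, one_mul]
    rfl
  rw [this, ← F_eq_sum_g]

-- ===== VERDICT (by name: the statement is the Claim_ definition above) =====
theorem dir_len_spec : Claim_equal_dir_len := by
  intro s depth _ hpre
  unfold Spec_dir_len
  rw [dir_len_eq_F s depth hpre.1, dir_len_alt_eq_F s depth hpre.1]
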